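-- pv_equiv track=rewrite | github.com/spuuntries/uni-daspro | tugas-5/password/passwordbut.py | why
-- ===== SOURCE A (Python) =====
-- def why(n, res=[]):  # mhm
--     if len(res) < 1:
--         res = [n]
--     if n % 4 != 0 and n == 1:
--         return res  # Break the recursion because we've reached the end condition.
--     if n % 4 == 0:
--         n //= 4
--         res += [n]
--     else:
--         n += 1
--         res += [n]
--     return why(n, res)
-- ===== SOURCE B (Python) =====
-- def why(n, res=[]):  # block-wise: run of increments to the next multiple of 4, then one division
--     if len(res) < 1:
--         res = [n]
--     while n != 1:
--         r = (-n) % 4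
--         res.extend(range(n + 1, n + r + 1))
--         n = (n + r) // 4
--         res.append(n)
--     return res
-- ===== Notes on version B (the rewrite author's own statement) =====
-- stated objective: alternative
-- what changed: Replaced A's step-at-a-time recursion by an iterative loop that processes a whole block per iteration: it appends the run of increments up to the next multiple of 4 with range(), then the single quotient, instead of one recursive call per element.
import Mathlib
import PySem

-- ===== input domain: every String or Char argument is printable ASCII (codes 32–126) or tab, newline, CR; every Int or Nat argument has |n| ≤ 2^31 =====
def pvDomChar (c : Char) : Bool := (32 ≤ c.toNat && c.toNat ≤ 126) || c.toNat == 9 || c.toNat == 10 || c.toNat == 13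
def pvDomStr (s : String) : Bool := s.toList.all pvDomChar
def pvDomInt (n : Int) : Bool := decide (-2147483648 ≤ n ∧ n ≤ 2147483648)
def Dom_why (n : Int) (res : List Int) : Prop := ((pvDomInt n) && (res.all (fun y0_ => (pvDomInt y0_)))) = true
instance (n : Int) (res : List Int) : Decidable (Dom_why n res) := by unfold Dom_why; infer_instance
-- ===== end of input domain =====

-- B processes a whole block per loop iteration (the run of increments up to the next
-- multiple of 4, then one division) instead of A's one recursive call per appended element.
-- A mutates a non-empty caller-passed `res` in place; B performs the same mutation, so the
-- equivalence proved here about return values carries over to the side effect as well.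
-- Both ports use a fuel counter only to make the (for n ≥ 1 terminating) recursion total
-- in Lean; inside Pre_ the fuel is never exhausted.

-- ===== PORT A =====
def whyFuel : Nat → Int → List Int → List Int
  | 0, _, res => res
  | f + 1, n, res =>
    let res1 := if res.length < 1 then [n] else res
    if PySem.Int.mod n 4 ≠ 0 ∧ n = 1 then res1
    else if PySem.Int.mod n 4 = 0 then
      whyFuel f (PySem.Int.floordiv n 4) (res1 ++ [PySem.Int.floordiv n 4])
    else
      whyFuel f (n + 1) (res1 ++ [n + 1])

def why (n : Int) (res : List Int) : List Int := whyFuel 8589934593 n res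

-- ===== PORT B =====
def whyAltGo : Nat → Int → List Int → List Int
  | 0, _, res => res
  | f + 1, n, res =>
    if n = 1 then res
    else
      let r := PySem.Int.mod (-n) 4
      let n' := PySem.Int.floordiv (n + r) 4
      whyAltGo f n' ((res ++ PySem.List.pyRange (n + 1) (n + r + 1) 1) ++ [n'])

def why_alt (n : Int) (res : List Int) : List Int :=
  whyAltGo 2147483649 n (if res.length < 1 then [n] else res)

-- ===== PRECONDITION & SPEC =====
-- Pre_ excludes n ≤ 0, on which A never reaches 1 and raises RecursionError.
def Pre_why (n : Int) (res : List Int) : Prop := 1 ≤ n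
instance (n : Int) (res : List Int) : Decidable (Pre_why n res) := by unfold Pre_why; infer_instance
def pvWitness_why : Int × List Int := (5, [])

def Spec_why (n : Int) (res : List Int) (out : List Int) : Prop := out = why_alt n res
instance (n : Int) (res : List Int) (out : List Int) : Decidable (Spec_why n res out) := by unfold Spec_why; infer_instance

-- ===== CLAIM (what is proved, stated in full; the proofs are below) =====
def Claim_equal_why : Prop := ∀ (n : Int) (res : List Int), Dom_why n res → Pre_why n res → Spec_why n res (why n res)

-- ===== LEMMAS AND PROOFS =====

theorem whyFuel_guard_nil (f : Nat) (n : Int) : whyFuel (f + 1) n [] = whyFuel (f + 1) n [n] := by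
  simp [whyFuel]

theorem whyFuel_halt (f : Nat) (res : List Int) (hres : res ≠ []) :
    whyFuel (f + 1) 1 res = res := by
  cases res with
  | nil => exact absurd rfl hres
  | cons a l =>
    simp [whyFuel, PySem.Int.mod_eq_emod_of_pos (show (0:Int) < 4 by norm_num)]

theorem whyFuel_step_div (f : Nat) (n : Int) (res : List Int) (hres : res ≠ [])
    (h : n % 4 = 0) (hn : 2 ≤ n) :
    whyFuel (f + 1) n res = whyFuel f (n / 4) (res ++ [n / 4]) := by
  cases res with
  | nil => exact absurd rfl hres
  | cons a l =>
    simp [whyFuel, PySem.Int.mod_eq_emod_of_pos (show (0:Int) < 4 by norm_num),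
      PySem.Int.floordiv_eq_ediv_of_pos (show (0:Int) < 4 by norm_num), h]

theorem whyFuel_step_inc (f : Nat) (n : Int) (res : List Int) (hres : res ≠ [])
    (h : ¬ n % 4 = 0) (hn : 2 ≤ n) :
    whyFuel (f + 1) n res = whyFuel f (n + 1) (res ++ [n + 1]) := by
  cases res with
  | nil => exact absurd rfl hres
  | cons a l =>
    simp [whyFuel, PySem.Int.mod_eq_emod_of_pos (show (0:Int) < 4 by norm_num), h,
      show ¬ n = 1 by omega]

theorem whyAltGo_step (f : Nat) (n : Int) (hn : 2 ≤ n) :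
    whyAltGo (f + 1) n res =
      whyAltGo f ((n + (-n) % 4) / 4)
        ((res ++ PySem.List.pyRange (n + 1) (n + (-n) % 4 + 1) 1) ++ [(n + (-n) % 4) / 4]) := by
  simp [whyAltGo, PySem.Int.mod_eq_emod_of_pos (show (0:Int) < 4 by norm_num),
    PySem.Int.floordiv_eq_ediv_of_pos (show (0:Int) < 4 by norm_num), show ¬ n = 1 by omega]

theorem key (N : Nat) : ∀ (n : Int) (res : List Int) (fA fB : Nat),
    1 ≤ n → n ≤ (N : Int) → res ≠ [] → 4 * N + 1 ≤ fA → N + 1 ≤ fB →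
    whyFuel fA n res = whyAltGo fB n res := by
  induction N with
  | zero => intro n res fA fB h1 h2 _ _ _; exfalso; omega
  | succ N ih =>
    intro n res fA fB h1 h2 hres hfA hfB
    obtain ⟨fA', rfl⟩ : ∃ f, fA = f + 4 := ⟨fA - 4, by omega⟩
    obtain ⟨fB', rfl⟩ : ∃ f, fB = f + 1 := ⟨fB - 1, by omega⟩
    by_cases hone : n = 1
    · subst hone
      rw [show fA' + 4 = (fA' + 3) + 1 from rfl, whyFuel_halt _ _ hres]
      cases res with
      | nil => exact absurd rfl hres
      | cons a l => simp [whyAltGo]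
    · have h2n : 2 ≤ n := by omega
      have hm4 : n % 4 = 0 ∨ n % 4 = 1 ∨ n % 4 = 2 ∨ n % 4 = 3 := by omega
      rcases hm4 with hm | hm | hm | hm
      · -- one division step; r = 0
        rw [show fA' + 4 = (fA' + 3) + 1 from rfl,
          whyFuel_step_div _ _ _ hres hm h2n, whyAltGo_step _ _ h2n,
          show (-n) % 4 = 0 by omega,
          PySem.List.pyRange_one_eq_nil (by omega)]
        rw [ih _ _ _ fB' (by omega) (by omega) (by simp) (by omega) (by omega)]
        congr 1 <;> simp
      · -- three increment steps then a division; r = 3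
        rw [show fA' + 4 = ((fA' + 2) + 1) + 1 from rfl,
          whyFuel_step_inc _ _ _ hres (by omega) h2n,
          whyFuel_step_inc _ _ _ (by simp) (by omega) (by omega),
          show fA' + 2 = (fA' + 1) + 1 from rfl,
          whyFuel_step_inc _ _ _ (by simp) (by omega) (by omega),
          whyFuel_step_div _ _ _ (by simp) (by omega) (by omega),
          whyAltGo_step _ _ h2n, show (-n) % 4 = 3 by omega,
          PySem.List.pyRange_one_cons (by omega), PySem.List.pyRange_one_cons (by omega),
          PySem.List.pyRange_one_cons (by omega), PySem.List.pyRange_one_eq_nil (by omega)]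
        rw [show n + 1 + 1 + 1 = n + 3 by ring, show n + 1 + 1 = n + 2 by ring,
          ih _ _ _ fB' (by omega) (by omega) (by simp) (by omega) (by omega)]
        congr 1 <;> simp
      · -- two increment steps then a division; r = 2
        rw [show fA' + 4 = ((fA' + 2) + 1) + 1 from rfl,
          whyFuel_step_inc _ _ _ hres (by omega) h2n,
          whyFuel_step_inc _ _ _ (by simp) (by omega) (by omega),
          show fA' + 2 = (fA' + 1) + 1 from rfl,
          whyFuel_step_div _ _ _ (by simp) (by omega) (by omega),
          whyAltGo_step _ _ h2n, show (-n) % 4 = 2 by omega,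
          PySem.List.pyRange_one_cons (by omega), PySem.List.pyRange_one_cons (by omega),
          PySem.List.pyRange_one_eq_nil (by omega)]
        rw [show n + 1 + 1 = n + 2 by ring,
          ih _ _ _ fB' (by omega) (by omega) (by simp) (by omega) (by omega)]
        congr 1 <;> simp
      · -- one increment step then a division; r = 1
        rw [show fA' + 4 = ((fA' + 2) + 1) + 1 from rfl,
          whyFuel_step_inc _ _ _ hres (by omega) h2n,
          whyFuel_step_div _ _ _ (by simp) (by omega) (by omega),
          whyAltGo_step _ _ h2n, show (-n) % 4 = 1 by omega,
          PySem.List.pyRange_one_cons (by omega), PySem.List.pyRange_one_eq_nil (by omega)]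
        rw [ih _ _ _ fB' (by omega) (by omega) (by simp) (by omega) (by omega)]

-- ===== VERDICT (by name: the statement is the Claim_ definition above) =====
theorem why_spec : Claim_equal_why := by
  intro n res hdom hpre
  have hn2 : n ≤ (2147483648 : Int) := by
    unfold Dom_why pvDomInt at hdom
    simp only [Bool.and_eq_true, decide_eq_true_eq] at hdom
    exact hdom.1.2
  have h1 : (1:Int) ≤ n := hpre
  have hN : n ≤ ((2147483648 : Nat) : Int) := by exact_mod_cast hn2
  unfold Spec_why why why_alt
  cases res with
  | nil =>
    have hg : whyFuel 8589934593 n [] = whyFuel 8589934593 n [n] := by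
      rw [show (8589934593 : Nat) = 8589934592 + 1 from by norm_num]
      exact whyFuel_guard_nil _ _
    rw [hg, key 2147483648 n [n] 8589934593 2147483649 h1 hN (by simp) (by norm_num) (by norm_num)]
    norm_num
  | cons a l =>
    rw [key 2147483648 n (a :: l) 8589934593 2147483649 h1 hN (by simp) (by norm_num) (by norm_num)]
    norm_num
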